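-- pv_equiv track=rewrite | github.com/litchi7777/har-atlas | docs/atlas/validate.py | validate_motion_id
-- ===== SOURCE A (Python) =====
-- from typing import Dict, Set, List, Tuple, Optional
--
-- def validate_motion_id(motion_id: str, canonical: Dict[str, Set[str]]) -> Tuple[bool, str, Optional[str]]:
--     """
--     Motion IDを検証
--
--     Returns:
--         (is_valid, body_part, error_message)
--     """
--     # Prefix からbody partを判定
--     prefix_map = {
--         'HD': 'head',
--         'W': 'wrist',
--         'C': 'chest',
--         'H': 'hip',
--         'L': 'leg',
--     }
--
--     detected_bp = None
--     for prefix, bp in prefix_map.items():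
--         if motion_id.startswith(prefix):
--             # HD と H を区別
--             if prefix == 'H' and motion_id.startswith('HD'):
--                 continue
--             detected_bp = bp
--             break
--
--     if detected_bp is None:
--         return False, None, f"Unknown prefix in motion ID: {motion_id}"
--
--     if detected_bp not in canonical:
--         return False, detected_bp, f"Body part '{detected_bp}' not in canonical motions"
--
--     if motion_id not in canonical[detected_bp]:
--         return False, detected_bp, f"Motion '{motion_id}' not in canonical {detected_bp} motions"
--
--     return True, detected_bp, None
-- ===== SOURCE B (Python) =====
-- from typing import Dict, Set, List, Tuple, Optional
--
-- _TWO_CHAR = {'HD': 'head'}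
-- _ONE_CHAR = {'W': 'wrist', 'C': 'chest', 'H': 'hip', 'L': 'leg'}
--
-- def validate_motion_id(motion_id: str, canonical: Dict[str, Set[str]]) -> Tuple[bool, str, Optional[str]]:
--     detected_bp = _TWO_CHAR.get(motion_id[:2])
--     if detected_bp is None:
--         detected_bp = _ONE_CHAR.get(motion_id[:1])
--
--     if detected_bp is None:
--         return False, None, f"Unknown prefix in motion ID: {motion_id}"
--
--     if detected_bp not in canonical:
--         return False, detected_bp, f"Body part '{detected_bp}' not in canonical motions"
--
--     if motion_id not in canonical[detected_bp]:
--         return False, detected_bp, f"Motion '{motion_id}' not in canonical {detected_bp} motions"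
--
--     return True, detected_bp, None
-- ===== Notes on version B (the rewrite author's own statement) =====
-- stated objective: simpler
-- what changed: Replaces A's scan over an ordered prefix list (with an HD-vs-H continue guard) by two direct dict lookups: motion_id[:2] in a two-char map first, then motion_id[:1] in a one-char map, which makes the HD/H precedence structural.
import Mathlib
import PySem

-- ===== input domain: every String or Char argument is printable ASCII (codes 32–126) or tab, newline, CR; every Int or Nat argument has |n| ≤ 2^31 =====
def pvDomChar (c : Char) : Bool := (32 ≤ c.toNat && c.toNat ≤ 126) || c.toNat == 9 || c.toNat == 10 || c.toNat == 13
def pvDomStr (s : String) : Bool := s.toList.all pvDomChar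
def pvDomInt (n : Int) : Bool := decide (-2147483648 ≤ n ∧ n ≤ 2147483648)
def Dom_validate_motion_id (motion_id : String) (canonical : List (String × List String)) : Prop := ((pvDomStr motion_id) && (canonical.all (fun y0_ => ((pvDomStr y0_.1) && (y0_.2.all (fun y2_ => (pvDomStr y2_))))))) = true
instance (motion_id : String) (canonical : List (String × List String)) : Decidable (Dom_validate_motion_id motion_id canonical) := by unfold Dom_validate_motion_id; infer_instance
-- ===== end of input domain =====

-- B replaces A's ordered prefix scan (with its HD-vs-H continue guard) by two direct
-- prefix-map lookups (motion_id[:2] first, then motion_id[:1]); objective: simpler.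

-- ===== PORT A =====
-- the for-loop over prefix_map.items(), with the 'continue' for H when the id starts with HD
def pvALoop (mid : String) : List (String × String) → Option String
  | [] => none
  | (p, bp) :: rest =>
    if PySem.Str.startswith mid p then
      if p == "H" && PySem.Str.startswith mid "HD" then pvALoop mid rest
      else some bp
    else pvALoop mid rest

def validate_motion_id (motion_id : String) (canonical : List (String × List String)) : Bool × Option String × Option String :=
  match pvALoop motion_id [("HD", "head"), ("W", "wrist"), ("C", "chest"), ("H", "hip"), ("L", "leg")] with
  | none => (false, none, some ("Unknown prefix in motion ID: " ++ motion_id))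
  | some bp =>
    match PySem.Dict.get? (PySem.Dict.mk canonical) bp with
    | none => (false, some bp, some ("Body part '" ++ bp ++ "' not in canonical motions"))
    | some motions =>
      if motion_id ∈ motions then (true, some bp, none)
      else (false, some bp, some ("Motion '" ++ motion_id ++ "' not in canonical " ++ bp ++ " motions"))

-- ===== PORT B =====
-- detected_bp = _TWO_CHAR.get(motion_id[:2]) or, failing that, _ONE_CHAR.get(motion_id[:1])
def pvBDetect (mid : String) : Option String :=
  match PySem.Dict.get? (PySem.Dict.mk [("HD", "head")]) (PySem.Str.slice mid none (some 2)) with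
  | some bp => some bp
  | none => PySem.Dict.get? (PySem.Dict.mk [("W", "wrist"), ("C", "chest"), ("H", "hip"), ("L", "leg")]) (PySem.Str.slice mid none (some 1))

def validate_motion_id_alt (motion_id : String) (canonical : List (String × List String)) : Bool × Option String × Option String :=
  match pvBDetect motion_id with
  | none => (false, none, some ("Unknown prefix in motion ID: " ++ motion_id))
  | some bp =>
    match PySem.Dict.get? (PySem.Dict.mk canonical) bp with
    | none => (false, some bp, some ("Body part '" ++ bp ++ "' not in canonical motions"))
    | some motions =>
      if motion_id ∈ motions then (true, some bp, none)
      else (false, some bp, some ("Motion '" ++ motion_id ++ "' not in canonical " ++ bp ++ " motions"))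

-- ===== PRECONDITION & SPEC =====
def Spec_validate_motion_id (motion_id : String) (canonical : List (String × List String)) (out : Bool × Option String × Option String) : Prop := out = validate_motion_id_alt motion_id canonical
instance (motion_id : String) (canonical : List (String × List String)) (out : Bool × Option String × Option String) : Decidable (Spec_validate_motion_id motion_id canonical out) := by unfold Spec_validate_motion_id; infer_instance

-- ===== CLAIM (what is proved, stated in full; the proofs are below) =====
def Claim_equal_validate_motion_id : Prop := ∀ (motion_id : String) (canonical : List (String × List String)), Dom_validate_motion_id motion_id canonical → Spec_validate_motion_id motion_id canonical (validate_motion_id motion_id canonical)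

-- ===== LEMMAS AND PROOFS =====
-- motion_id.startswith(p)  =  (p == motion_id[:n])  when p has length n
lemma startswith_eq_slice (mid p : String) (n : Nat) (hn : p.toList.length = n) :
    PySem.Str.startswith mid p = (p == PySem.Str.slice mid none (some (n : Int))) := by
  subst hn
  apply Bool.eq_iff_iff.mpr
  rw [beq_iff_eq, ← String.toList_inj]
  have hsl : (PySem.Str.slice mid none (some (p.toList.length : Int))).toList
      = mid.toList.take p.toList.length := by
    simp [PySem.Str.toList_slice, PySem.List.slice_to_natCast]
  rw [hsl]
  simp only [PySem.Str.startswith_eq]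
  rw [PySem.Chars.startswith_iff, List.prefix_iff_eq_take]

lemma get?_mk_nil (k : String) :
    (PySem.Dict.mk ([] : List (String × String))).get? k = none := by
  simp [PySem.Dict.get?]

-- A's prefix scan and B's two-map lookup detect the same body part
set_option maxHeartbeats 1000000 in
lemma detect_eq (mid : String) :
    pvALoop mid [("HD", "head"), ("W", "wrist"), ("C", "chest"), ("H", "hip"), ("L", "leg")] = pvBDetect mid := by
  simp only [pvALoop, pvBDetect, PySem.Dict.get?_mk_cons, get?_mk_nil,
    startswith_eq_slice mid "HD" 2 (by decide), startswith_eq_slice mid "W" 1 (by decide),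
    startswith_eq_slice mid "C" 1 (by decide), startswith_eq_slice mid "H" 1 (by decide),
    startswith_eq_slice mid "L" 1 (by decide), beq_self_eq_true, Bool.true_and]
  split_ifs <;> simp_all

-- ===== VERDICT (by name: the statement is the Claim_ definition above) =====
theorem validate_motion_id_spec : Claim_equal_validate_motion_id := by
  intro motion_id canonical _
  unfold Spec_validate_motion_id validate_motion_id validate_motion_id_alt
  rw [detect_eq]
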